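-- pv_equiv track=rewrite | github.com/AhmedTElKodsh/hands-on-ai-engineering | src/ingest/tables.py | _ensure_unique_headers
-- ===== SOURCE A (Python) =====
-- from typing import Any, Dict, List, Optional
--
-- def _ensure_unique_headers(headers: List[str]) -> List[str]:
--     seen: Dict[str, int] = {}
--     unique: List[str] = []
--     for h in headers:
--         if h in seen:
--             seen[h] += 1
--             unique.append(f"{h}_{seen[h]}")
--         else:
--             seen[h] = 0
--             unique.append(h)
--     return unique
-- ===== SOURCE B (Python) =====
-- from typing import Dict, List
--
-- def _ensure_unique_headers(headers: List[str]) -> List[str]: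
--     # Stage 1: index every header's positions; Stage 2: assemble the output
--     # by writing each occurrence's label at its position.
--     positions: Dict[str, List[int]] = {}
--     for i, h in enumerate(headers):
--         positions[h] = positions.get(h, []) + [i]
--     out = [""] * len(headers)
--     for h, idxs in positions.items():
--         for k, i in enumerate(idxs):
--             out[i] = h if k == 0 else f"{h}_{k}"
--     return out
-- ===== Notes on version B (the rewrite author's own statement) =====
-- stated objective: alternative
-- what changed: Replaces A's single appending pass with a running counter dict by a two-stage group-and-scatter: first build an index mapping each header to the list of its positions, then assemble the output out of order by writing the k-th occurrence's label (h or h_k) at its recorded position.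
import Mathlib
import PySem

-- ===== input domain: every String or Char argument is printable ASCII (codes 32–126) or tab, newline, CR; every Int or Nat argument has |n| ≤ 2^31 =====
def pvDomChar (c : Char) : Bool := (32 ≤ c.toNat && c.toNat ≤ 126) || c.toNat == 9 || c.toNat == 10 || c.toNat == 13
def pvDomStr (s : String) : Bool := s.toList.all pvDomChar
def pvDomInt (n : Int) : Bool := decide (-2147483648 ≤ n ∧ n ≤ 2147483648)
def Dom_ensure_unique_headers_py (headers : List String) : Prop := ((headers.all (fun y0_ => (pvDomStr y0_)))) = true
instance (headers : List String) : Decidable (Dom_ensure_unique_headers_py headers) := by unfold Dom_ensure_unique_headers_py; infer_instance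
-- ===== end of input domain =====

-- B replaces A's single counting pass (running seen-dict, appended output) by a two-stage
-- group-and-scatter: index every header's positions, then assemble the output by positional
-- writes (objective: alternative; not faster).


-- ===== PORT A =====
-- loop body: if h in seen: seen[h] += 1; unique.append(f"{h}_{seen[h]}") else: seen[h] = 0; unique.append(h)
def euhStep (acc : PySem.Dict String Int × List String) (h : String) :
    PySem.Dict String Int × List String :=
  let seen := acc.1
  let unique := acc.2
  if seen.contains h then
    let seen' := seen.modify h 0 (· + 1)                       -- seen[h] += 1
    (seen', unique ++ [h ++ "_" ++ PySem.Int.toStr (seen'.getD h 0)])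
  else
    (seen.insert h 0, unique ++ [h])

def ensure_unique_headers_py (headers : List String) : List String :=
  (headers.foldl euhStep (PySem.Dict.empty, [])).2

-- ===== PORT B =====
-- stage 1: positions[h] = positions.get(h, []) + [i]  for i, h in enumerate(headers)
def buildPositions (headers : List String) : PySem.Dict String (List Int) :=
  (PySem.List.enumerate headers).foldl
    (fun d p => d.modify p.2 [] (fun l => l ++ [p.1])) PySem.Dict.empty

-- stage 2: out = [""]*len(headers); for h, idxs in positions.items(): for k, i in enumerate(idxs): out[i] = h if k == 0 else f"{h}_{k}"
-- out[i] = v is ported with the total pySetD: every index recorded in stage 1 came from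
-- enumerate(headers), so it is in range and Python's IndexError is unreachable (exact here).
def ensure_unique_headers_py_alt (headers : List String) : List String :=
  ((buildPositions headers).items).foldl
    (fun out e =>
      (PySem.List.enumerate e.2).foldl
        (fun out q =>
          PySem.List.pySetD out q.2
            (if q.1 = 0 then e.1 else e.1 ++ "_" ++ PySem.Int.toStr q.1))
        out)
    (List.replicate headers.length "")

-- ===== PRECONDITION & SPEC =====
def Spec_ensure_unique_headers_py (headers : List String) (out : List String) : Prop := out = ensure_unique_headers_py_alt headers
instance (headers : List String) (out : List String) : Decidable (Spec_ensure_unique_headers_py headers out) := by unfold Spec_ensure_unique_headers_py; infer_instance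

-- ===== CLAIM (what is proved, stated in full; the proofs are below) =====
def Claim_equal_ensure_unique_headers_py : Prop := ∀ (headers : List String), Dom_ensure_unique_headers_py headers → Spec_ensure_unique_headers_py headers (ensure_unique_headers_py headers)

-- ===== LEMMAS AND PROOFS =====

-- the label the function assigns at position j: the header itself on its first
-- occurrence, else header_&lt;count of strictly-prior occurrences&gt;
def lblAt (headers : List String) (j : Nat) : String :=
  let h := headers.getD j ""
  let c := (headers.take j).count h
  if c = 0 then h else h ++ "_" ++ PySem.Int.toStr (c : Int)

-- the positions of h in headers, in increasing order
def idxsOf (headers : List String) (h : String) : List Nat :=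
  (List.range headers.length).filter (fun j => headers.getD j "" == h)

-- common recursive reading of A: output for suffix `rest` after prefix `p` is processed
def euhGo (p : List String) : List String → List String
  | [] => []
  | h :: t =>
    (if p.count h = 0 then h else h ++ "_" ++ PySem.Int.toStr (p.count h : Int)) :: euhGo (p ++ [h]) t

-- the invariant A's `seen` dict maintains over the processed prefix p
def euhInv (p : List String) (seen : PySem.Dict String Int) : Prop :=
  ∀ h : String, seen.contains h = decide (p.count h ≠ 0) ∧
    (p.count h ≠ 0 → seen.getD h 0 = (p.count h : Int) - 1)

theorem euhInv_step (p : List String) (seen : PySem.Dict String Int) (h : String)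
    (hi : euhInv p seen) :
    euhInv (p ++ [h]) (if p.count h = 0 then seen.insert h 0 else seen.modify h 0 (· + 1)) := by
  intro h'
  obtain ⟨hc, hv⟩ := hi h'
  by_cases he : h' = h
  · subst he
    have hcount : (p ++ [h']).count h' = p.count h' + 1 := by simp
    have hne1 : p.count h' + 1 ≠ 0 := by omega
    by_cases hz : p.count h' = 0
    · rw [if_pos hz]
      refine ⟨?_, ?_⟩
      · rw [PySem.Dict.contains_insert]; simp [hcount]
      · intro _
        rw [PySem.Dict.getD_insert, if_pos rfl, hcount, hz]; simp
    · rw [if_neg hz]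
      refine ⟨?_, ?_⟩
      · rw [PySem.Dict.contains_modify]; simp [hcount]
      · intro _
        rw [PySem.Dict.getD_modify, if_pos rfl, hv hz, hcount]; push_cast; ring
  · have hcount : (p ++ [h]).count h' = p.count h' := by
      simp [List.count_append, Ne.symm he]
    by_cases hz : p.count h = 0
    · rw [if_pos hz]
      refine ⟨?_, ?_⟩
      · rw [PySem.Dict.contains_insert, hcount]; simp [he, hc]
      · intro hne
        rw [hcount] at hne ⊢
        rw [PySem.Dict.getD_insert, if_neg he, hv hne]
    · rw [if_neg hz]
      refine ⟨?_, ?_⟩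
      · rw [PySem.Dict.contains_modify, hcount]; simp [he, hc]
      · intro hne
        rw [hcount] at hne ⊢
        rw [PySem.Dict.getD_modify, if_neg he, hv hne]

theorem euhA_fold (rest : List String) :
    ∀ (p : List String) (seen : PySem.Dict String Int) (u : List String),
    euhInv p seen →
    (rest.foldl euhStep (seen, u)).2 = u ++ euhGo p rest := by
  induction rest with
  | nil => intro p seen u _; simp [euhGo]
  | cons h t ih =>
    intro p seen u hi
    obtain ⟨hc, hv⟩ := hi h
    rw [List.foldl_cons]
    by_cases hz : p.count h = 0
    · have hcf : seen.contains h = false := by rw [hc]; simp [hz]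
      have hst : euhStep (seen, u) h = (seen.insert h 0, u ++ [h]) := by
        simp [euhStep, hcf]
      have hstep := euhInv_step p seen h hi
      rw [if_pos hz] at hstep
      rw [hst, ih (p ++ [h]) _ _ hstep]
      simp [euhGo, hz]
    · have hct : seen.contains h = true := by rw [hc]; simp [hz]
      have hval : (seen.modify h 0 (· + 1)).getD h 0 = (p.count h : Int) := by
        rw [PySem.Dict.getD_modify_self, hv hz]; ring
      have hst : euhStep (seen, u) h
          = (seen.modify h 0 (· + 1), u ++ [h ++ "_" ++ PySem.Int.toStr (p.count h : Int)]) := by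
        simp [euhStep, hct, hval]
      have hstep := euhInv_step p seen h hi
      rw [if_neg hz] at hstep
      rw [hst, ih (p ++ [h]) _ _ hstep]
      simp [euhGo, hz]

-- A's output, and below B's, both equal the positional labelling (List.range n).map (lblAt headers)

theorem enumerate_eq_map {α : Type} (d : α) (xs : List α) :
    ∀ (s : Int),
    PySem.List.enumerate xs s = (List.range xs.length).map (fun (j : Nat) => (s + (j : Int), xs.getD j d)) := by
  induction xs with
  | nil => intro s; simp [PySem.List.enumerate]
  | cons x t ih =>
    intro s
    rw [show PySem.List.enumerate (x :: t) s = (s, x) :: PySem.List.enumerate t (s + 1) from rfl,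
        ih (s + 1)]
    simp only [List.length_cons, List.range_succ_eq_map, List.map_cons, List.map_map]
    congr 1
    · simp
    · apply List.map_congr_left; intro j _
      simp only [Function.comp_apply, List.getD_cons_succ]
      congr 1
      push_cast; ring

theorem map_getD_range {α : Type} (d : α) (xs : List α) :
    (List.range xs.length).map (fun j => xs.getD j d) = xs := by
  apply List.ext_getElem
  · simp
  · intro i h1 h2
    simp [List.getD_eq_getElem?_getD, List.getElem?_eq_getElem h2]

theorem buildPositions_getD (headers : List String) (h : String) :
    (buildPositions headers).getD h [] = (idxsOf headers h).map (fun j => Int.ofNat j) := by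
  unfold buildPositions
  have hswap : PySem.List.enumerate headers 0
      = ((PySem.List.enumerate headers 0).map Prod.swap).map Prod.swap := by
    simp
  rw [hswap, List.foldl_map]
  simp only [Prod.fst_swap, Prod.snd_swap]
  rw [PySem.Dict.getD_foldl_modify_append]
  rw [PySem.Dict.getD_empty, List.nil_append, enumerate_eq_map ""]
  rw [List.map_map, List.filter_map, List.map_map]
  simp only [Function.comp_def, Prod.snd_swap, Prod.fst_swap, zero_add, idxsOf]
  rfl

theorem buildPositions_keys (headers : List String) :
    (buildPositions headers).keys = PySem.Set.ofList headers := by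
  unfold buildPositions
  rw [PySem.Dict.keys_foldl_modify_key (PySem.List.enumerate headers) (fun p => p.2) []
        (fun _ p => (fun l => l ++ [p.1])) PySem.Dict.empty]
  rw [enumerate_eq_map ""]
  simp only [List.map_map, Function.comp_def]
  rw [PySem.Dict.keys_empty]
  have : (List.range headers.length).map (fun j => headers.getD j "") = headers :=
    map_getD_range "" headers
  simp only [this]
  rfl

theorem buildPositions_nodup (headers : List String) :
    (buildPositions headers).keys.Nodup := by
  unfold buildPositions
  exact PySem.Dict.nodup_keys_foldl_modify_key (PySem.List.enumerate headers)
    (fun p => p.2) [] (fun _ p => (fun l => l ++ [p.1])) PySem.Dict.empty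
    (by rw [PySem.Dict.keys_empty]; exact List.nodup_nil)

theorem count_take_eq_filter_range (xs : List String) (h : String) :
    ∀ (j : Nat), j ≤ xs.length →
    (xs.take j).count h = ((List.range j).filter (fun i => xs.getD i "" == h)).length := by
  intro j
  induction j with
  | zero => intro _; simp
  | succ j ih =>
    intro hj
    have hjlt : j < xs.length := by omega
    have ht : xs.take (j + 1) = xs.take j ++ [xs.getD j ""] := by
      rw [List.take_add_one, List.getElem?_eq_getElem hjlt]
      simp [List.getD_eq_getElem?_getD, List.getElem?_eq_getElem hjlt]
    rw [ht, List.range_succ, List.filter_append, List.length_append, List.count_append,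
        ih (by omega)]
    by_cases hx : xs[j]?.getD "" = h
    · simp [hx]
    · simp [hx]

theorem filter_lt_of_pairwise (l : List Nat) (hp : l.Pairwise (· < ·)) :
    ∀ (k : Nat) (hk : k < l.length), (l.filter (fun x => x < l[k])).length = k := by
  intro k hk
  have hpg := List.pairwise_iff_getElem.mp hp
  have h1 : (l.take k).filter (fun x => x < l[k]) = l.take k := by
    rw [List.filter_eq_self]
    intro x hx
    obtain ⟨i, hi, hxi⟩ := List.getElem_of_mem hx
    have hik : i < k := by
      have := hi; simp [List.length_take] at this; omega
    rw [← hxi, List.getElem_take]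
    simpa using hpg i k (by omega) hk hik
  have h2 : (l.drop k).filter (fun x => x < l[k]) = [] := by
    rw [List.filter_eq_nil_iff]
    intro x hx
    obtain ⟨i, hi, hxi⟩ := List.getElem_of_mem hx
    have hlen : k + i < l.length := by
      have := hi; simp [List.length_drop] at this; omega
    have hge : l[k] ≤ l[k + i]'hlen := by
      rcases Nat.eq_zero_or_pos i with h0 | h0
      · subst h0; simp
      · exact le_of_lt (hpg k (k + i) hk hlen (by omega))
    rw [← hxi, List.getElem_drop]
    simp
    omega
  calc (l.filter (fun x => x < l[k])).length
      = ((l.take k ++ l.drop k).filter (fun x => x < l[k])).length := by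
        rw [List.take_append_drop]
    _ = k := by
        rw [List.filter_append, h1, h2, List.length_append, List.length_take]
        simp
        omega

theorem filter_lt_range (n j : Nat) (h : j ≤ n) :
    (List.range n).filter (fun x => x < j) = List.range j := by
  rcases Nat.exists_eq_add_of_le h with ⟨m, rfl⟩
  rw [List.range_add, List.filter_append]
  have h1 : (List.range j).filter (fun x => x < j) = List.range j := by
    rw [List.filter_eq_self]; intro a ha; simpa using List.mem_range.mp ha
  have h2 : ((List.range m).map (j + ·)).filter (fun x => x < j) = [] := by
    rw [List.filter_eq_nil_iff]; intro a ha
    obtain ⟨b, _, rfl⟩ := List.mem_map.mp ha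
    simp
  rw [h1, h2, List.append_nil]

theorem idxsOf_spec (headers : List String) (h : String) (k : Nat)
    (hk : k < (idxsOf headers h).length) :
    (idxsOf headers h)[k] < headers.length ∧
    headers.getD (idxsOf headers h)[k] "" = h ∧
    (headers.take (idxsOf headers h)[k]).count h = k := by
  have hmem : (idxsOf headers h)[k] ∈ idxsOf headers h := List.getElem_mem hk
  have hmem' := hmem
  unfold idxsOf at hmem'
  rw [List.mem_filter, List.mem_range] at hmem'
  obtain ⟨hlt, hpred⟩ := hmem'
  refine ⟨hlt, by simpa using hpred, ?_⟩
  set j := (idxsOf headers h)[k] with hj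
  rw [count_take_eq_filter_range headers h j (le_of_lt hlt)]
  have hpair : (idxsOf headers h).Pairwise (· < ·) := by
    unfold idxsOf
    exact List.Pairwise.filter _ (List.pairwise_lt_range)
  have hfr : (idxsOf headers h).filter (fun x => x < j)
      = (List.range j).filter (fun i => headers.getD i "" == h) := by
    unfold idxsOf
    rw [List.filter_filter, ← filter_lt_range headers.length j (le_of_lt hlt),
        List.filter_filter]
    apply List.filter_congr
    intro x _
    rw [Bool.and_comm]
  rw [← hfr]
  exact filter_lt_of_pairwise _ hpair k hk

theorem scatter_fold (f : Nat → String) :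
    ∀ (ws : List Nat) (out : List String), (∀ j ∈ ws, j < out.length) →
    (ws.foldl (fun o (j : Nat) => PySem.List.pySetD o (j : Int) (f j)) out).length = out.length ∧
    ∀ j : Nat, (ws.foldl (fun o (j : Nat) => PySem.List.pySetD o (j : Int) (f j)) out).getD j "" =
      if j ∈ ws then f j else out.getD j "" := by
  intro ws
  induction ws with
  | nil => intro out _; simp
  | cons x t ih =>
    intro out hin
    have hx : x < out.length := hin x (List.mem_cons_self)
    have hset : PySem.List.pySetD out (x : Int) (f x) = out.set x (f x) :=
      PySem.List.pySetD_natCast out x (f x)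
    have hlen : (out.set x (f x)).length = out.length := by simp
    have ht : ∀ j ∈ t, j < (out.set x (f x)).length := by
      intro j hj; rw [hlen]; exact hin j (List.mem_cons_of_mem _ hj)
    obtain ⟨ihl, ihg⟩ := ih (out.set x (f x)) ht
    rw [List.foldl_cons, hset]
    refine ⟨by rw [ihl, hlen], ?_⟩
    intro j
    rw [ihg j]
    by_cases hjt : j ∈ t
    · simp [hjt]
    · by_cases hjx : j = x
      · subst hjx
        simp [hjt, List.getD_eq_getElem?_getD, hx]
      · simp [hjt, hjx, List.getD_eq_getElem?_getD, List.getElem?_set_ne (Ne.symm hjx)]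

theorem euhGo_eq_map (suf : List String) :
    ∀ (p : List String),
    euhGo p suf = (List.range suf.length).map (fun k => lblAt (p ++ suf) (p.length + k)) := by
  induction suf with
  | nil => intro p; simp [euhGo]
  | cons h t ih =>
    intro p
    have hhead : lblAt (p ++ h :: t) (p.length + 0) =
        (if p.count h = 0 then h else h ++ "_" ++ PySem.Int.toStr (p.count h : Int)) := by
      unfold lblAt
      have hget : (p ++ h :: t).getD (p.length + 0) "" = h := by
        simp [List.getD_eq_getElem?_getD]
      have htake : (p ++ h :: t).take (p.length + 0) = p := by
        simp
      rw [Nat.add_zero] at *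
      simp only [hget, htake]
    rw [show euhGo p (h :: t)
        = (if p.count h = 0 then h else h ++ "_" ++ PySem.Int.toStr (p.count h : Int)) :: euhGo (p ++ [h]) t from rfl]
    rw [List.length_cons, List.range_succ_eq_map, List.map_cons, ← hhead, List.map_map]
    congr 1
    rw [ih (p ++ [h])]
    apply List.map_congr_left
    intro k _
    simp only [Function.comp_apply]
    have h1 : p ++ h :: t = (p ++ [h]) ++ t := by simp
    have h2 : p.length + (k + 1) = (p ++ [h]).length + k := by simp; omega
    rw [h1, h2]

theorem mem_idxsOf (headers : List String) (h : String) (j : Nat) :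
    j ∈ idxsOf headers h ↔ j < headers.length ∧ headers.getD j "" = h := by
  unfold idxsOf
  rw [List.mem_filter, List.mem_range]
  simp

theorem inner_eq_scatter (headers : List String) (h : String) (out : List String) :
    (PySem.List.enumerate ((idxsOf headers h).map (fun j => Int.ofNat j))).foldl
      (fun out q => PySem.List.pySetD out q.2
        (if q.1 = 0 then h else h ++ "_" ++ PySem.Int.toStr q.1)) out
    = (idxsOf headers h).foldl
        (fun o (j : Nat) => PySem.List.pySetD o (j : Int) (lblAt headers j)) out := by
  rw [enumerate_eq_map (0 : Int) _ 0, List.foldl_map]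
  conv_rhs => rw [← map_getD_range 0 (idxsOf headers h), List.foldl_map]
  rw [List.length_map]
  apply PySem.List.foldl_congr_mem
  intro o k hk
  rw [List.mem_range] at hk
  have hgetm : ((idxsOf headers h).map (fun j => Int.ofNat j)).getD k 0
      = Int.ofNat ((idxsOf headers h).getD k 0) := by
    rw [List.getD_eq_getElem?_getD, List.getElem?_map,
        List.getElem?_eq_getElem hk, List.getD_eq_getElem?_getD,
        List.getElem?_eq_getElem hk]
    rfl
  have hgd : (idxsOf headers h).getD k 0 = (idxsOf headers h)[k] := by
    rw [List.getD_eq_getElem?_getD, List.getElem?_eq_getElem hk]; rfl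
  obtain ⟨hlt, hgeth, hcnt⟩ := idxsOf_spec headers h k hk
  have hval : (if ((0 : Int) + (k : Int)) = 0 then h else h ++ "_" ++ PySem.Int.toStr ((0:Int) + (k : Int)))
      = lblAt headers ((idxsOf headers h).getD k 0) := by
    rw [hgd]
    unfold lblAt
    simp only [hgeth, hcnt, zero_add, Nat.cast_eq_zero]
  rw [hgetm, hval]
  rfl

theorem outer_fold (headers : List String) :
    ∀ (K : List String) (out : List String), out.length = headers.length →
    ((K.foldl (fun o h => (idxsOf headers h).foldl
        (fun o (j : Nat) => PySem.List.pySetD o (j : Int) (lblAt headers j)) o) out).length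
      = headers.length ∧
     ∀ j : Nat, (K.foldl (fun o h => (idxsOf headers h).foldl
        (fun o (j : Nat) => PySem.List.pySetD o (j : Int) (lblAt headers j)) o) out).getD j ""
      = if headers.getD j "" ∈ K ∧ j < headers.length then lblAt headers j else out.getD j "") := by
  intro K
  induction K with
  | nil => intro out hl; simp [hl]
  | cons h K' ih =>
    intro out hl
    have hin : ∀ j ∈ idxsOf headers h, j < out.length := by
      intro j hj; rw [hl]; exact ((mem_idxsOf headers h j).mp hj).1
    obtain ⟨slen, sget⟩ := scatter_fold (lblAt headers) (idxsOf headers h) out hin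
    set out' := (idxsOf headers h).foldl
        (fun o (j : Nat) => PySem.List.pySetD o (j : Int) (lblAt headers j)) out with ho'
    obtain ⟨ihl, ihg⟩ := ih out' (by rw [slen, hl])
    rw [List.foldl_cons]
    refine ⟨ihl, ?_⟩
    intro j
    rw [ihg j, sget j]
    by_cases hjn : j < headers.length
    · by_cases hK' : headers.getD j "" ∈ K'
      · rw [if_pos ⟨hK', hjn⟩, if_pos ⟨List.mem_cons_of_mem _ hK', hjn⟩]
      · by_cases hjh : headers.getD j "" = h
        · have hmem : j ∈ idxsOf headers h := (mem_idxsOf headers h j).mpr ⟨hjn, hjh⟩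
          rw [if_neg (by tauto), if_pos hmem, if_pos ⟨List.mem_cons.mpr (Or.inl hjh), hjn⟩]
        · have hmem : j ∉ idxsOf headers h := by rw [mem_idxsOf]; tauto
          rw [if_neg (by tauto), if_neg hmem,
              if_neg (by rw [List.mem_cons]; tauto)]
    · have hmem : j ∉ idxsOf headers h := by rw [mem_idxsOf]; tauto
      rw [if_neg (by tauto), if_neg hmem, if_neg (by tauto)]

theorem alt_eq_map (headers : List String) :
    ensure_unique_headers_py_alt headers
      = (List.range headers.length).map (lblAt headers) := by
  unfold ensure_unique_headers_py_alt
  have hstep : ∀ (out : List String) (e : String × List Int), e ∈ (buildPositions headers).items →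
      (PySem.List.enumerate e.2).foldl
        (fun out q => PySem.List.pySetD out q.2
          (if q.1 = 0 then e.1 else e.1 ++ "_" ++ PySem.Int.toStr q.1)) out
      = (idxsOf headers e.1).foldl
          (fun o (j : Nat) => PySem.List.pySetD o (j : Int) (lblAt headers j)) out := by
    intro o e he
    have hget : (buildPositions headers).getD e.1 [] = e.2 :=
      PySem.Dict.getD_of_mem_items (buildPositions headers)
        (by simpa using he) (buildPositions_nodup headers) []
    have he2 : e.2 = (idxsOf headers e.1).map (fun j => Int.ofNat j) := by
      rw [← hget, buildPositions_getD]
    rw [he2]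
    exact inner_eq_scatter headers e.1 o
  refine (PySem.List.foldl_congr_mem _ _ _ _ hstep).trans ?_
  rw [← List.foldl_map (f := fun (e : String × List Int) => e.1)
      (g := fun o h => (idxsOf headers h).foldl
        (fun o (j : Nat) => PySem.List.pySetD o (j : Int) (lblAt headers j)) o)]
  rw [show ((buildPositions headers).items.map (fun e => e.1)) = (buildPositions headers).keys
      from rfl]
  obtain ⟨flen, fget⟩ := outer_fold headers ((buildPositions headers).keys)
      (List.replicate headers.length "") (by simp)
  apply List.ext_getElem
  · rw [flen]; simp
  · intro i h1 h2
    have hi : i < headers.length := by rw [flen] at h1; exact h1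
    have hmemk : headers.getD i "" ∈ (buildPositions headers).keys := by
      rw [buildPositions_keys, PySem.Set.mem_ofList]
      rw [List.getD_eq_getElem?_getD, List.getElem?_eq_getElem hi]
      exact List.getElem_mem hi
    have hval := fget i
    rw [if_pos ⟨hmemk, hi⟩] at hval
    rw [← List.getD_eq_getElem _ "" h1, hval, List.getElem_map]
    congr 1
    simp [List.getElem_range]

theorem a_eq_map (headers : List String) :
    ensure_unique_headers_py headers = (List.range headers.length).map (lblAt headers) := by
  unfold ensure_unique_headers_py
  have hinv : euhInv [] PySem.Dict.empty := by
    intro h; simp [PySem.Dict.contains_empty, PySem.Dict.getD_empty]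
  rw [euhA_fold headers [] PySem.Dict.empty [] hinv, List.nil_append,
      euhGo_eq_map headers []]
  simp

-- ===== VERDICT (by name: the statement is the Claim_ definition above) =====
theorem ensure_unique_headers_py_spec : Claim_equal_ensure_unique_headers_py := by
  intro headers _
  unfold Spec_ensure_unique_headers_py
  rw [a_eq_map, alt_eq_map]
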